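-- pv_equiv track=rewrite | github.com/edoBaldini/IoTGreenCalc | server/app.py | check_maintenance_times
-- ===== SOURCE A (Python) =====
-- def check_maintenance_times(x, y):
--     z = []
--     for i in range(len(x)):
--         for j in range(len(x[i])):
--             z.append(x[i][j]) if not x[i][j] in z else ""
--     z.sort()
--     y.sort()
--     return z == y
-- ===== SOURCE B (Python) =====
-- def check_maintenance_times(x, y):
--     # Flatten+sort once, sort y in place, then verify z == y WITHOUT building z:
--     # walk the sorted flat list with a pointer, consuming one run of equal
--     # elements per element of y (two-pointer run-consuming comparison).
--     flat = sorted(v for row in x for v in row)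
--     y.sort()
--     n = len(flat)
--     i = 0
--     for v in y:
--         if i == n or flat[i] != v:
--             return False
--         while i < n and flat[i] == v:
--             i += 1
--     return i == n
-- ===== Notes on version B (the rewrite author's own statement) =====
-- stated objective: faster
-- what changed: A deduplicates while flattening with a linear membership scan of the growing list z (quadratic) and then compares the two sorted lists; B flattens and sorts once and never materialises z: a single pointer walks the sorted flat list, consuming one run of equal elements per element of sorted y.
import Mathlib
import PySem

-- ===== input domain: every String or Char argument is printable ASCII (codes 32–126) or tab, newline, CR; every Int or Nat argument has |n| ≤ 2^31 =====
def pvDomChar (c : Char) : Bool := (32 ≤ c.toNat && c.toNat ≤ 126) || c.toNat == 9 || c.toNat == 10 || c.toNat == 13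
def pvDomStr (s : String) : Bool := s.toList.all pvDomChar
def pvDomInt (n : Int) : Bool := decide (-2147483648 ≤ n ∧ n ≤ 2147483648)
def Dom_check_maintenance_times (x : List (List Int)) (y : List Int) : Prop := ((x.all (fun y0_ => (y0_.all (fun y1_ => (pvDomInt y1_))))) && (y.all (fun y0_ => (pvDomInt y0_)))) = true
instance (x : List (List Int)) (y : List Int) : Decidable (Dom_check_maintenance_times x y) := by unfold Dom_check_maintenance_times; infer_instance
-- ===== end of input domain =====

-- B replaces A's quadratic dedup-while-flattening (membership scan of the growing z, then a
-- sort and a list comparison) by one sort of the flat list and a pointer walk that consumes a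
-- run of equal elements per element of sorted y, never building z (faster). Both Pythons sort
-- y in place; the equivalence proved here is about the return value.

-- ===== PORT A =====
def check_maintenance_times (x : List (List Int)) (y : List Int) : Bool :=
  let z := x.foldl (fun z row => row.foldl (fun z v => if v ∈ z then z else z ++ [v]) z) []
  let z := PySem.List.sorted z (fun v => v) false
  let ys := PySem.List.sorted y (fun v => v) false
  decide (z = ys)

-- ===== PORT B =====
-- the 'for v in y' loop with pointer i into flat; the suffix of flat from i is the list
-- argument, 'while flat[i] == v: i += 1' is the dropWhile step
def cmtGo : List Int → List Int → Bool
  | f, [] => f.isEmpty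
  | [], _ :: _ => false
  | w :: t, v :: ys => if w = v then cmtGo (t.dropWhile (· == v)) ys else false

def check_maintenance_times_alt (x : List (List Int)) (y : List Int) : Bool :=
  let flat := PySem.List.sorted (x.flatMap (fun r => r)) (fun v => v) false
  let ys := PySem.List.sorted y (fun v => v) false
  cmtGo flat ys

-- ===== PRECONDITION & SPEC =====
def Spec_check_maintenance_times (x : List (List Int)) (y : List Int) (out : Bool) : Prop := out = check_maintenance_times_alt x y
instance (x : List (List Int)) (y : List Int) (out : Bool) : Decidable (Spec_check_maintenance_times x y out) := by unfold Spec_check_maintenance_times; infer_instance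

-- ===== CLAIM (what is proved, stated in full; the proofs are below) =====
def Claim_equal_check_maintenance_times : Prop := ∀ (x : List (List Int)) (y : List Int), Dom_check_maintenance_times x y → Spec_check_maintenance_times x y (check_maintenance_times x y)

-- ===== LEMMAS AND PROOFS =====

-- A's accumulator step
def stepA (z : List Int) (v : Int) : List Int := if v ∈ z then z else z ++ [v]

theorem foldlA_mem (l : List Int) (z : List Int) (a : Int) :
    a ∈ l.foldl stepA z ↔ a ∈ z ∨ a ∈ l := by
  induction l generalizing z with
  | nil => simp
  | cons v t ih =>
    simp only [List.foldl_cons, ih, stepA]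
    split_ifs with h <;> simp <;> constructor
    · rintro (h1|h1) <;> tauto
    · rintro (h1 | h1 | h1) <;> simp_all
    · tauto
    · tauto

theorem foldlA_nodup (l : List Int) (z : List Int) (hz : z.Nodup) :
    (l.foldl stepA z).Nodup := by
  induction l generalizing z with
  | nil => simpa
  | cons v t ih =>
    simp only [List.foldl_cons, stepA]
    split_ifs with h
    · exact ih z hz
    · refine ih _ ?_
      simp only [List.nodup_append, List.nodup_cons, List.nodup_nil, and_true, true_and, hz]
      refine ⟨List.not_mem_nil, ?_⟩
      intro a ha b hb he
      rw [List.mem_singleton] at hb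
      exact h (hb ▸ he ▸ ha)

theorem foldlA_flatten (x : List (List Int)) :
    x.foldl (fun z row => row.foldl stepA z) [] = x.flatten.foldl stepA [] := by
  rw [List.foldl_flatten]

-- run-length dedup of a list: what B's pointer walk compares y against
def rle : List Int → List Int
  | [] => []
  | v :: t => v :: rle (t.dropWhile (· == v))
  termination_by l => l.length
  decreasing_by
    exact Nat.lt_succ_of_le (List.length_dropWhile_le _ _)

theorem cmtGo_eq_rle (ys : List Int) (f : List Int) :
    cmtGo f ys = decide (rle f = ys) := by
  induction ys generalizing f with
  | nil =>
    cases f with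
    | nil => simp [cmtGo, rle]
    | cons w t => simp [cmtGo, rle]
  | cons v ys ih =>
    cases f with
    | nil => simp [cmtGo, rle]
    | cons w t =>
      simp only [cmtGo, rle]
      by_cases h : w = v
      · subst h
        rw [ih]
        simp
      · simp [h]

theorem mem_dropWhile_of_ne (t : List Int) (v a : Int) (ha : a ∈ t) (hne : a ≠ v) :
    a ∈ t.dropWhile (· == v) := by
  rw [← List.takeWhile_append_dropWhile (p := (· == v)) (l := t)] at ha
  rcases List.mem_append.1 ha with h | h
  · exact absurd (by simpa using List.mem_takeWhile_imp h) hne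
  · exact h

theorem mem_rle (s : List Int) (a : Int) : a ∈ rle s ↔ a ∈ s := by
  induction s using rle.induct with
  | case1 => simp [rle]
  | case2 v t ih =>
    rw [rle]
    constructor
    · intro h
      rcases List.mem_cons.1 h with rfl | h
      · simp
      · have := ih.1 h
        exact List.mem_cons_of_mem _ (List.Sublist.mem this (List.dropWhile_sublist _))
    · intro h
      rcases List.mem_cons.1 h with rfl | h
      · simp
      · by_cases hv : a = v
        · simp [hv]
        · exact List.mem_cons_of_mem _ (ih.2 (mem_dropWhile_of_ne t v a h hv))

theorem rle_pairwise (s : List Int) (hs : s.Pairwise (· ≤ ·)) :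
    (rle s).Pairwise (· < ·) := by
  induction s using rle.induct with
  | case1 => simp [rle]
  | case2 v t ih =>
    rw [rle]
    set d := t.dropWhile (· == v) with hd
    have hdsub : d.Sublist t := List.dropWhile_sublist _
    have hdp : d.Pairwise (· ≤ ·) := hs.of_cons.sublist hdsub
    refine List.pairwise_cons.2 ⟨?_, ih hdp⟩
    intro a ha
    have ha' : a ∈ d := (mem_rle d a).1 ha
    -- every element of d is ≥ its head, and its head is an element of t not equal to v
    cases hdc : d with
    | nil => rw [hdc] at ha'; exact absurd ha' (List.not_mem_nil)
    | cons w d' =>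
      have hwne : ¬ (w == v) := by
        have := List.head?_dropWhile_not (p := (· == v)) (l := t)
        rw [← hd, hdc] at this; simpa using this
      have hwt : w ∈ t := List.Sublist.mem (by simp) (hdc ▸ hdsub)
      have hvw : v ≤ w := List.rel_of_pairwise_cons hs hwt
      have hvltw : v < w := lt_of_le_of_ne hvw (fun he => hwne (by simp [he]))
      rw [hdc] at ha'
      rcases List.mem_cons.1 ha' with rfl | ha'
      · exact hvltw
      · exact lt_of_lt_of_le hvltw (List.rel_of_pairwise_cons (hdc ▸ hdp) ha')

-- A's sorted dedup list equals rle of the sorted flat list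
theorem key_eq (x : List (List Int)) :
    PySem.List.sorted
      (x.foldl (fun z row => row.foldl stepA z) []) (fun v => v) false
    = rle (PySem.List.sorted (x.flatMap (fun r => r)) (fun v => v) false) := by
  set s := PySem.List.sorted (x.flatMap (fun r => r)) (fun v => v) false with hs
  set zA := x.foldl (fun z row => row.foldl stepA z) [] with hzA
  have hsp : s.Pairwise (· ≤ ·) := PySem.List.sorted_pairwise _ _
  have hrlt : (rle s).Pairwise (· < ·) := rle_pairwise s hsp
  have hrnodup : (rle s).Nodup := hrlt.imp ne_of_lt
  have hzAnodup : zA.Nodup := by rw [hzA, foldlA_flatten]; exact foldlA_nodup _ [] (by simp)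
  have hmem : ∀ a, a ∈ rle s ↔ a ∈ zA := by
    intro a
    rw [mem_rle, hs, PySem.List.mem_sorted, hzA, foldlA_flatten, foldlA_mem]
    simp [List.mem_flatten]
  have hperm : (rle s).Perm zA := by
    rw [List.perm_ext_iff_of_nodup hrnodup hzAnodup]
    exact hmem
  exact PySem.List.sorted_eq_of_perm_of_pairwise_lt zA (rle s) (fun v => v) hperm hrlt

-- ===== VERDICT (by name: the statement is the Claim_ definition above) =====
theorem check_maintenance_times_spec : Claim_equal_check_maintenance_times := by
  intro x y _
  unfold Spec_check_maintenance_times check_maintenance_times check_maintenance_times_alt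
  simp only [show (fun (z : List Int) (v : Int) => if v ∈ z then z else z ++ [v]) = stepA from rfl]
  rw [cmtGo_eq_rle, ← key_eq]
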